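-- pv_equiv track=rewrite | github.com/mawright/sparse-transformer-layers | tests/subset_attn/conftest.py | filter_valid_tensor_names
-- ===== SOURCE A (Python) =====
-- from typing import Any, Literal, Union, Optional
--
-- DIFFERENTIABLE_TENSOR_NAMES = [
--     "query_tensor",
--     "sparse_tensor_values",
--     "key_weight",
--     "value_weight",
--     "key_bias",
--     "value_bias",
--     "selection_fill",
--     "key_rope_encoding",
--     "key_positions",
--     "rope_freqs",
-- ]
--
-- def filter_valid_tensor_names(
--     use_rope: Union[Literal["none"], Literal["precomputed"], Literal["from_freqs"]],
--     use_biases: bool,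
--     use_selection_fill: bool,
-- ) -> list[str]:
--     """Filter tensor names based on the given parameters.
--
--     Returns a list of tensor names that are valid for the given combination
--     of use_rope and use_biases parameters.
--     """
--     # Start with all tensors
--     valid_tensors = list(DIFFERENTIABLE_TENSOR_NAMES)
--
--     if use_rope != "precomputed":
--         # Remove key_rope_encoding if not using precomputed RoPE
--         valid_tensors = [t for t in valid_tensors if t != "key_rope_encoding"]
--
--     if use_rope != "from_freqs":
--         # Remove position-based RoPE tensors if not computing RoPE from frequencies
--         valid_tensors = [
--             t for t in valid_tensors if t not in ["key_positions", "rope_freqs"]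
--         ]
--
--     if not use_biases:
--         # Remove bias tensors if not using biases
--         valid_tensors = [
--             t for t in valid_tensors if t not in ["key_bias", "value_bias"]
--         ]
--
--     if not use_selection_fill:
--         valid_tensors = [t for t in valid_tensors if t != "selection_fill"]
--
--     return valid_tensors
-- ===== SOURCE B (Python) =====
-- DIFFERENTIABLE_TENSOR_NAMES = [
--     "query_tensor",
--     "sparse_tensor_values",
--     "key_weight",
--     "value_weight",
--     "key_bias",
--     "value_bias",
--     "selection_fill",
--     "key_rope_encoding",
--     "key_positions",
--     "rope_freqs",
-- ]
--
-- def filter_valid_tensor_names(use_rope, use_biases, use_selection_fill):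
--     keep = {
--         "key_rope_encoding": use_rope == "precomputed",
--         "key_positions": use_rope == "from_freqs",
--         "rope_freqs": use_rope == "from_freqs",
--         "key_bias": use_biases,
--         "value_bias": use_biases,
--         "selection_fill": use_selection_fill,
--     }
--     return [t for t in DIFFERENTIABLE_TENSOR_NAMES if keep.get(t, True)]
-- ===== Notes on version B (the rewrite author's own statement) =====
-- stated objective: simpler
-- what changed: Replaces four sequential conditional filter passes over the list with one pass that consults a dict mapping each conditional tensor name to the boolean deciding whether it is kept.
import Mathlib
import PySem

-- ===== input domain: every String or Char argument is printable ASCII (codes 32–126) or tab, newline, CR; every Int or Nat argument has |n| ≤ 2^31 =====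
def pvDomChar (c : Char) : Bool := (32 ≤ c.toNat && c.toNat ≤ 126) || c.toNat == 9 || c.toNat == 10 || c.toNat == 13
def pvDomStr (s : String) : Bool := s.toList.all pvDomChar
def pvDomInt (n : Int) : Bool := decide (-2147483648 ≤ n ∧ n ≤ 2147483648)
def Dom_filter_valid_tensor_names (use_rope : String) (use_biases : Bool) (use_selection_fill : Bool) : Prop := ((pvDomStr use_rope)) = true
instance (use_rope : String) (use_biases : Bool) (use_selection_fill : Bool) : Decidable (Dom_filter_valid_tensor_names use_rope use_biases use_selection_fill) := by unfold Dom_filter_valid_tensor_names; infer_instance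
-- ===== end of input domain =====

-- ===== PORT A =====
-- One honest line: B replaces A's four sequential filter passes by a single pass driven by a
-- dict from conditional tensor name to its keep-condition (objective: simpler).
def DIFFERENTIABLE_TENSOR_NAMES : List String :=
  ["query_tensor", "sparse_tensor_values", "key_weight", "value_weight",
   "key_bias", "value_bias", "selection_fill", "key_rope_encoding",
   "key_positions", "rope_freqs"]

def filter_valid_tensor_names (use_rope : String) (use_biases : Bool) (use_selection_fill : Bool) : List String :=
  let valid_tensors := DIFFERENTIABLE_TENSOR_NAMES
  let valid_tensors :=
    if use_rope != "precomputed" then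
      valid_tensors.filter (fun t => t != "key_rope_encoding")
    else valid_tensors
  let valid_tensors :=
    if use_rope != "from_freqs" then
      valid_tensors.filter (fun t => !(["key_positions", "rope_freqs"].contains t))
    else valid_tensors
  let valid_tensors :=
    if !use_biases then
      valid_tensors.filter (fun t => !(["key_bias", "value_bias"].contains t))
    else valid_tensors
  let valid_tensors :=
    if !use_selection_fill then
      valid_tensors.filter (fun t => t != "selection_fill")
    else valid_tensors
  valid_tensors

-- ===== PORT B =====
def filter_valid_tensor_names_alt (use_rope : String) (use_biases : Bool) (use_selection_fill : Bool) : List String :=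
  let keep : PySem.Dict String Bool :=
    (((((PySem.Dict.empty.insert "key_rope_encoding" (use_rope == "precomputed")).insert
        "key_positions" (use_rope == "from_freqs")).insert
        "rope_freqs" (use_rope == "from_freqs")).insert
        "key_bias" use_biases).insert
        "value_bias" use_biases).insert
        "selection_fill" use_selection_fill
  DIFFERENTIABLE_TENSOR_NAMES.filter (fun t => keep.getD t true)

-- ===== PRECONDITION & SPEC =====
def Spec_filter_valid_tensor_names (use_rope : String) (use_biases : Bool) (use_selection_fill : Bool) (out : List String) : Prop := out = filter_valid_tensor_names_alt use_rope use_biases use_selection_fill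
instance (use_rope : String) (use_biases : Bool) (use_selection_fill : Bool) (out : List String) : Decidable (Spec_filter_valid_tensor_names use_rope use_biases use_selection_fill out) := by unfold Spec_filter_valid_tensor_names; infer_instance

-- ===== CLAIM (what is proved, stated in full; the proofs are below) =====
def Claim_equal_filter_valid_tensor_names : Prop := ∀ (use_rope : String) (use_biases : Bool) (use_selection_fill : Bool), Dom_filter_valid_tensor_names use_rope use_biases use_selection_fill → Spec_filter_valid_tensor_names use_rope use_biases use_selection_fill (filter_valid_tensor_names use_rope use_biases use_selection_fill)

-- ===== LEMMAS AND PROOFS =====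

-- ===== VERDICT (by name: the statement is the Claim_ definition above) =====
theorem filter_valid_tensor_names_spec : Claim_equal_filter_valid_tensor_names := by
  intro use_rope use_biases use_selection_fill _
  unfold Spec_filter_valid_tensor_names
  cases hp : use_rope == "precomputed" <;> cases hf : use_rope == "from_freqs" <;>
    (have hp' := hp; have hf' := hf;
     simp only [beq_iff_eq, beq_eq_false_iff_ne] at hp' hf' <;>
      cases use_biases <;> cases use_selection_fill <;>
        simp [filter_valid_tensor_names, filter_valid_tensor_names_alt,
        DIFFERENTIABLE_TENSOR_NAMES, PySem.Dict.getD, PySem.Dict.get?,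
        PySem.Dict.insert, PySem.Dict.empty, hp, hf, hp', hf', List.filter])
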